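-- pv_equiv track=rewrite | github.com/Yonas-Assefa/Competetive-Programming | week2/python_track/A. Number Replacement.py | numberReplacment
-- ===== SOURCE A (Python) =====
-- def numberReplacment(length, numbers, letters):
--     num_letter_match = {}
--
--     for i in range(length):
--         num = numbers[i]
--         ltr = letters[i]
--
--         if num in num_letter_match:
--             if num_letter_match[num] != ltr:
--                 return "NO"
--         else:
--             num_letter_match[num] = ltr
--
--     return "YES"
-- ===== SOURCE B (Python) =====
-- def numberReplacment(length, numbers, letters):
--     pairs = set()
--     nums = set()
--     for i in range(length):
--         pairs.add((numbers[i], letters[i]))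
--         nums.add(numbers[i])
--     return "YES" if len(pairs) == len(nums) else "NO"
-- ===== Notes on version B (the rewrite author's own statement) =====
-- stated objective: alternative
-- what changed: Replaces the dict-consistency scan with early return by counting distinct (number,letter) pairs versus distinct numbers over the whole prefix: a number mapped to two letters yields an extra distinct pair, so the answer is YES iff the two set sizes are equal.
-- outside the precondition, e.g. on numberReplacment(4, [4, 4, -3], ['', 'YES']): A returns 'NO', B raises IndexError
import Mathlib
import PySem

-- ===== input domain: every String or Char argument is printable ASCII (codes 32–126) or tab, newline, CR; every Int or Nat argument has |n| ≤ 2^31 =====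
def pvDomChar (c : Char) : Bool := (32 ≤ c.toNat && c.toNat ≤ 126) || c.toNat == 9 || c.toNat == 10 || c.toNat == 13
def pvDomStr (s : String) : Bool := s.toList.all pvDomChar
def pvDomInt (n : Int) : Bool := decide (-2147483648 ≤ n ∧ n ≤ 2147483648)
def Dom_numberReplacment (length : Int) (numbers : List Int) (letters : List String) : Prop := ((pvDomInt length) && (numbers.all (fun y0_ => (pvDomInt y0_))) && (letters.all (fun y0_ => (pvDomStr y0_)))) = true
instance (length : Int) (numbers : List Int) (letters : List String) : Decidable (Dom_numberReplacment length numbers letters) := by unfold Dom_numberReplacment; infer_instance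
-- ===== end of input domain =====

-- B replaces A's dict scan (with early return) by comparing the number of distinct
-- (number,letter) pairs with the number of distinct numbers — an alternative algorithm,
-- not claimed faster.

-- ===== PORT A =====
-- the for-loop over range(length); indexing is exact inside Pre_ (indices in range);
-- the .getD defaults are never read there (Python raises IndexError outside Pre_).
def pvALoop (numbers : List Int) (letters : List String)
    (d : PySem.Dict Int String) : List Int → String
  | [] => "YES"
  | i :: rest =>
    let num := (PySem.List.pyGet? numbers i).getD 0
    let ltr := (PySem.List.pyGet? letters i).getD ""
    match d.get? num with
    | some v => if v ≠ ltr then "NO" else pvALoop numbers letters d rest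
    | none => pvALoop numbers letters (d.insert num ltr) rest

def numberReplacment (length : Int) (numbers : List Int) (letters : List String) : String :=
  pvALoop numbers letters PySem.Dict.empty (PySem.List.pyRange 0 length 1)

-- ===== PORT B =====
def pvBLoop (numbers : List Int) (letters : List String) :
    List Int → PySem.Set (Int × String) × PySem.Set Int →
    PySem.Set (Int × String) × PySem.Set Int
  | [], st => st
  | i :: rest, st =>
    pvBLoop numbers letters rest
      (PySem.Set.add st.1 ((PySem.List.pyGet? numbers i).getD 0,
                           (PySem.List.pyGet? letters i).getD ""),
       PySem.Set.add st.2 ((PySem.List.pyGet? numbers i).getD 0))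

def numberReplacment_alt (length : Int) (numbers : List Int) (letters : List String) : String :=
  let st := pvBLoop numbers letters (PySem.List.pyRange 0 length 1)
              (PySem.Set.empty, PySem.Set.empty)
  if st.1.length = st.2.length then "YES" else "NO"

-- ===== PRECONDITION & SPEC =====
-- Pre_ excludes the inputs where range(length) indexes past a list: there B always raises
-- IndexError, and A either raises too or happens to early-return "NO" at a conflict seen
-- before the out-of-range index.
def Pre_numberReplacment (length : Int) (numbers : List Int) (letters : List String) : Prop :=
  length ≤ (numbers.length : Int) ∧ length ≤ (letters.length : Int)
instance (length : Int) (numbers : List Int) (letters : List String) : Decidable (Pre_numberReplacment length numbers letters) := by unfold Pre_numberReplacment; infer_instance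

def pvWitness_numberReplacment : Int × List Int × List String := (3, [1, 2, 1], ["a", "b", "a"])

def Spec_numberReplacment (length : Int) (numbers : List Int) (letters : List String) (out : String) : Prop := out = numberReplacment_alt length numbers letters
instance (length : Int) (numbers : List Int) (letters : List String) (out : String) : Decidable (Spec_numberReplacment length numbers letters out) := by unfold Spec_numberReplacment; infer_instance

-- ===== CLAIM (what is proved, stated in full; the proofs are below) =====
def Claim_equal_numberReplacment : Prop := ∀ (length : Int) (numbers : List Int) (letters : List String), Dom_numberReplacment length numbers letters → Pre_numberReplacment length numbers letters → Spec_numberReplacment length numbers letters (numberReplacment length numbers letters)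

-- ===== LEMMAS AND PROOFS =====

-- Proof-side versions of the two loops, over the list of fetched (number, letter) pairs.
def pvALoopP (d : PySem.Dict Int String) : List (Int × String) → String
  | [] => "YES"
  | (n, l) :: rest =>
    match d.get? n with
    | some v => if v ≠ l then "NO" else pvALoopP d rest
    | none => pvALoopP (d.insert n l) rest

def pvBAddAll : List (Int × String) → PySem.Set (Int × String) → PySem.Set Int →
    PySem.Set (Int × String) × PySem.Set Int
  | [], P, N => (P, N)
  | (n, l) :: rest, P, N => pvBAddAll rest (PySem.Set.add P (n, l)) (PySem.Set.add N n)

def pvFetch (numbers : List Int) (letters : List String) (i : Int) : Int × String :=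
  ((PySem.List.pyGet? numbers i).getD 0, (PySem.List.pyGet? letters i).getD "")

lemma pvALoop_eq_P (numbers : List Int) (letters : List String) :
    ∀ (idxs : List Int) (d : PySem.Dict Int String),
      pvALoop numbers letters d idxs = pvALoopP d (idxs.map (pvFetch numbers letters)) := by
  intro idxs
  induction idxs with
  | nil => intro d; rfl
  | cons i rest ih =>
    intro d
    simp only [pvALoop, pvALoopP, List.map, pvFetch]
    cases d.get? ((PySem.List.pyGet? numbers i).getD 0) with
    | none => exact ih _
    | some v =>
      by_cases h : v = (PySem.List.pyGet? letters i).getD ""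
      · simp [h, ih]
      · simp [h]

lemma pvBLoop_eq_P (numbers : List Int) (letters : List String) :
    ∀ (idxs : List Int) (P : PySem.Set (Int × String)) (N : PySem.Set Int),
      pvBLoop numbers letters idxs (P, N)
        = pvBAddAll (idxs.map (pvFetch numbers letters)) P N := by
  intro idxs
  induction idxs with
  | nil => intro P N; rfl
  | cons i rest ih => intro P N; simp only [pvBLoop, pvBAddAll, List.map, pvFetch]; exact ih _ _

-- "N is the set of first components of P"
def pvFstInv (P : PySem.Set (Int × String)) (N : PySem.Set Int) : Prop :=
  ∀ n : Int, n ∈ N ↔ ∃ l, (n, l) ∈ P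

-- once the pair set is strictly larger than the number set, it stays so
lemma pvMono : ∀ (zs : List (Int × String)) (P : PySem.Set (Int × String)) (N : PySem.Set Int),
    pvFstInv P N → N.length < P.length →
    (pvBAddAll zs P N).2.length < (pvBAddAll zs P N).1.length := by
  intro zs
  induction zs with
  | nil => intro P N _ hlt; exact hlt
  | cons p rest ih =>
    obtain ⟨n, l⟩ := p
    intro P N hinv hlt
    simp only [pvBAddAll]
    by_cases hp : (n, l) ∈ P
    · have hn : n ∈ N := (hinv n).mpr ⟨l, hp⟩
      rw [PySem.Set.add_of_mem hp, PySem.Set.add_of_mem hn]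
      exact ih P N hinv hlt
    · rw [PySem.Set.add_of_not_mem hp]
      by_cases hn : n ∈ N
      · rw [PySem.Set.add_of_mem hn]
        refine ih _ _ ?_ (by simp; omega)
        intro m
        constructor
        · intro hm; obtain ⟨l', hl'⟩ := (hinv m).mp hm; exact ⟨l', by simp [hl']⟩
        · rintro ⟨l', hl'⟩
          rcases List.mem_append.mp hl' with h | h
          · exact (hinv m).mpr ⟨l', h⟩
          · simp at h; rw [h.1]; exact hn
      · rw [PySem.Set.add_of_not_mem hn]
        refine ih _ _ ?_ (by simp; omega)
        intro m
        constructor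
        · intro hm
          rcases List.mem_append.mp hm with h | h
          · obtain ⟨l', hl'⟩ := (hinv m).mp h; exact ⟨l', by simp [hl']⟩
          · simp at h; exact ⟨l, by simp [h]⟩
        · rintro ⟨l', hl'⟩
          rcases List.mem_append.mp hl' with h | h
          · exact List.mem_append.mpr (Or.inl ((hinv m).mpr ⟨l', h⟩))
          · simp at h; simp [h.1]

-- main invariant proof: A's scan agrees with B's cardinality comparison
lemma pvMain : ∀ (zs : List (Int × String)) (d : PySem.Dict Int String)
    (P : PySem.Set (Int × String)) (N : PySem.Set Int),
    (∀ n l, d.get? n = some l ↔ (n, l) ∈ P) → pvFstInv P N → P.length = N.length →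
    pvALoopP d zs
      = (if (pvBAddAll zs P N).1.length = (pvBAddAll zs P N).2.length then "YES" else "NO") := by
  intro zs
  induction zs with
  | nil => intro d P N _ _ hlen; simp [pvALoopP, pvBAddAll, hlen]
  | cons p rest ih =>
    obtain ⟨n, l⟩ := p
    intro d P N hd hinv hlen
    simp only [pvALoopP, pvBAddAll]
    cases hg : d.get? n with
    | some v =>
      by_cases hvl : v = l
      · subst hvl
        have hp : (n, v) ∈ P := (hd n v).mp hg
        have hn : n ∈ N := (hinv n).mpr ⟨v, hp⟩
        simp only [PySem.Set.add_of_mem hp, PySem.Set.add_of_mem hn, ne_eq,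
          not_true_eq_false, if_false]
        exact ih d P N hd hinv hlen
      · simp only [ne_eq, hvl, not_false_eq_true, if_true]
        -- A returns "NO"; show the final set sizes differ
        have hpv : (n, v) ∈ P := (hd n v).mp hg
        have hnl : (n, l) ∉ P := fun hm => hvl (by
          have := (hd n l).mpr hm; rw [hg] at this; exact Option.some.inj this)
        have hn : n ∈ N := (hinv n).mpr ⟨v, hpv⟩
        simp only [PySem.Set.add_of_not_mem hnl, PySem.Set.add_of_mem hn]
        have hinv' : pvFstInv (P ++ [(n, l)]) N := by
          intro m
          constructor
          · intro hm; obtain ⟨l', hl'⟩ := (hinv m).mp hm; exact ⟨l', by simp [hl']⟩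
          · rintro ⟨l', hl'⟩
            rcases List.mem_append.mp hl' with h | h
            · exact (hinv m).mpr ⟨l', h⟩
            · simp at h; rw [h.1]; exact hn
        have hlt : N.length < (P ++ [(n, l)]).length := by simp; omega
        have := pvMono rest (P ++ [(n, l)]) N hinv' hlt
        have hne : (pvBAddAll rest (P ++ [(n, l)]) N).1.length
            ≠ (pvBAddAll rest (P ++ [(n, l)]) N).2.length := by omega
        simp [hne]
    | none =>
      have hfresh : ∀ l', (n, l') ∉ P := fun l' hm => by
        have := (hd n l').mpr hm; rw [hg] at this; exact absurd this (by simp)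
      have hnN : n ∉ N := fun hm => by
        obtain ⟨l', hl'⟩ := (hinv n).mp hm; exact hfresh l' hl'
      simp only [PySem.Set.add_of_not_mem (hfresh l), PySem.Set.add_of_not_mem hnN]
      refine ih (d.insert n l) _ _ ?_ ?_ (by simp [hlen])
      · intro m l'
        rw [PySem.Dict.get?_insert]
        by_cases hm : m = n
        · subst hm
          simp only [reduceIte]
          constructor
          · intro h; simp [Option.some.inj h]
          · intro h
            rcases List.mem_append.mp h with h | h
            · exact absurd h (hfresh l')
            · simp at h; rw [h]
        · rw [if_neg hm]
          rw [hd m l']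
          constructor
          · intro h; simp [h]
          · intro h
            rcases List.mem_append.mp h with h | h
            · exact h
            · simp at h; exact absurd h.1 hm
      · intro m
        by_cases hm : m = n
        · subst hm
          simp only [List.mem_append]
          constructor
          · intro h; exact ⟨l, Or.inr (by simp)⟩
          · intro _; simp
        · constructor
          · intro hm'
            rcases List.mem_append.mp hm' with h | h
            · obtain ⟨l', hl'⟩ := (hinv m).mp h; exact ⟨l', by simp [hl']⟩
            · simp at h; exact absurd h hm
          · rintro ⟨l', hl'⟩
            rcases List.mem_append.mp hl' with h | h
            · exact List.mem_append.mpr (Or.inl ((hinv m).mpr ⟨l', h⟩))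
            · simp at h; exact absurd h.1 hm

-- ===== VERDICT (by name: the statement is the Claim_ definition above) =====
theorem numberReplacment_spec : Claim_equal_numberReplacment := by
  intro length numbers letters _ _
  unfold Spec_numberReplacment numberReplacment numberReplacment_alt
  rw [pvALoop_eq_P, pvBLoop_eq_P]
  exact pvMain _ PySem.Dict.empty PySem.Set.empty PySem.Set.empty
    (by intro n l; simp [PySem.Dict.get?_empty]) (by intro n; simp [PySem.Set.empty]) rfl
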